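-- pv_equiv track=rewrite | github.com/alstjrwjd99/BaekJun | 프로그래머스/2/42626. 더 맵게/더 맵게.py | solution
-- ===== SOURCE A (Python) =====
-- import heapq
--
-- def solution(scoville, K):
--     answer = 0
--     heapq.heapify(scoville)
--     while scoville[0] < K:
--         least = heapq.heappop(scoville)
--         second = heapq.heappop(scoville)
--         heapq.heappush(scoville, least + second * 2)
--         answer += 1
--         if len(scoville) < 2 and scoville[0] < K:
--             return -1
--     return answer
-- ===== SOURCE B (Python) =====
-- def _insert(x, xs):
--     # insert x into sorted xs, keeping it sorted (stable: after equal elements' left)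
--     k = 0
--     while k < len(xs) and xs[k] < x:
--         k += 1
--     return xs[:k] + [x] + xs[k:]
--
-- def solution(scoville, K):
--     q = sorted(scoville)
--     answer = 0
--     while q[0] < K:
--         if len(q) == 1:
--             return -1
--         q = _insert(q[0] + q[1] * 2, q[2:])
--         answer += 1
--     return answer
-- ===== Notes on version B (the rewrite author's own statement) =====
-- stated objective: alternative
-- what changed: Replaces the binary min-heap with a sorted-list priority queue: sort once, then each round merges the first two elements and re-inserts the merged value in order, folding A's post-merge -1 check into the loop-top test.
import Mathlib
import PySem

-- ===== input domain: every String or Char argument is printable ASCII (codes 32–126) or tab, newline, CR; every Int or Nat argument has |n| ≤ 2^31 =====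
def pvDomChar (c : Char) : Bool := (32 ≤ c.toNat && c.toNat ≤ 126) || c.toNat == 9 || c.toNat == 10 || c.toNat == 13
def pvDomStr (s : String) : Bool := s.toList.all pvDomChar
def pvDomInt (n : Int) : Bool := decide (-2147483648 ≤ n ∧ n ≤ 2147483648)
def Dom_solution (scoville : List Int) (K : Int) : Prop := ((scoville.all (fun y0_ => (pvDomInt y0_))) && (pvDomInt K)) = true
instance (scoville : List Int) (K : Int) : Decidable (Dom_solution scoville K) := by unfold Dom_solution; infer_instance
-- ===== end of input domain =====

-- B replaces A's binary min-heap with a sorted-list priority queue (sort once, merge the two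
-- head elements, re-insert in order); equivalence is about the RETURN value only — A heapifies
-- its argument in place, B leaves it untouched.

-- ===== PORT A =====
-- heapq is ported by its contract on the list's contents: heapify rearranges in place (the
-- multiset of elements is unchanged, so it is the identity here), heappop yields the smallest
-- element and removes one occurrence of it, heappush appends the value to the collection.
-- The fuel argument is always the current list length (each iteration shrinks it by one);
-- it only makes the recursion structural. Where Python raises IndexError (scoville[0] on an
-- empty list, heappop from an empty heap) the port returns 0: those inputs are outside Pre_.
def solGo (K : Int) : Nat → List Int → Int → Int
  | 0, _, _ => 0
  | fuel + 1, l, ans =>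
    match PySem.List.min? l (fun y => y) with
    | none => 0                                   -- while scoville[0] < K on []: IndexError
    | some least =>
      if least < K then
        match PySem.List.min? (l.erase least) (fun y => y) with
        | none => 0                               -- second heappop from empty heap: IndexError
        | some second =>
          let l2 := (l.erase least).erase second ++ [least + second * 2]
          if l2.length < 2 ∧ l2.headI < K then -1
          else solGo K fuel l2 (ans + 1)
      else ans

def solution (scoville : List Int) (K : Int) : Int :=
  solGo K scoville.length scoville 0

-- ===== PORT B =====
-- _insert(x, xs): insert x into the sorted list xs, keeping it sorted
def insOrd (x : Int) : List Int → List Int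
  | [] => [x]
  | y :: ys => if y < x then y :: insOrd x ys else x :: y :: ys

-- fuel = current length of q, as in solGo; q = [] at the top test is IndexError (outside Pre_)
def altGo (K : Int) : Nat → List Int → Int → Int
  | 0, _, _ => 0
  | fuel + 1, q, ans =>
    match q with
    | [] => 0
    | x :: rest =>
      if x < K then
        match rest with
        | [] => -1
        | y :: rest2 => altGo K fuel (insOrd (x + y * 2) rest2) (ans + 1)
      else ans

def solution_alt (scoville : List Int) (K : Int) : Int :=
  altGo K scoville.length (PySem.List.sorted scoville (fun y => y) false) 0

-- ===== PRECONDITION & SPEC =====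
-- Pre_ excludes exactly the inputs where A raises IndexError: the empty list, and a
-- one-element list whose element is below K (the second heappop finds the heap empty).
def Pre_solution (scoville : List Int) (K : Int) : Prop :=
  scoville ≠ [] ∧ (scoville.length = 1 → K ≤ scoville.headI)
instance (scoville : List Int) (K : Int) : Decidable (Pre_solution scoville K) := by
  unfold Pre_solution; infer_instance

def pvWitness_solution : List Int × Int := ([1, 2, 9], 7)

def Spec_solution (scoville : List Int) (K : Int) (out : Int) : Prop := out = solution_alt scoville K
instance (scoville : List Int) (K : Int) (out : Int) : Decidable (Spec_solution scoville K out) := by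
  unfold Spec_solution; infer_instance

-- ===== CLAIM (what is proved, stated in full; the proofs are below) =====
def Claim_equal_solution : Prop := ∀ (scoville : List Int) (K : Int), Dom_solution scoville K → Pre_solution scoville K → Spec_solution scoville K (solution scoville K)


-- ===== LEMMAS AND PROOFS =====

theorem perm_insOrd (x : Int) (s : List Int) : (insOrd x s).Perm (x :: s) := by
  induction s with
  | nil => rfl
  | cons y ys ih =>
    simp only [insOrd]; split
    · exact (ih.cons y).trans (List.Perm.swap x y ys)
    · rfl

theorem sorted_insOrd (x : Int) (s : List Int) (hs : s.Pairwise (· ≤ ·)) :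
    (insOrd x s).Pairwise (· ≤ ·) := by
  induction s with
  | nil => simp [insOrd]
  | cons y ys ih =>
    rw [List.pairwise_cons] at hs
    simp only [insOrd]; split
    · rename_i hyx
      rw [List.pairwise_cons]
      refine ⟨fun z hz => ?_, ih hs.2⟩
      rcases List.mem_cons.mp ((perm_insOrd x ys).mem_iff.mp hz) with h | h
      · exact le_of_lt (h ▸ hyx)
      · exact hs.1 z h
    · rename_i hxy
      rw [List.pairwise_cons]
      refine ⟨fun z hz => ?_, List.pairwise_cons.mpr hs⟩
      rcases List.mem_cons.mp hz with h | h
      · exact h ▸ not_lt.mp hxy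
      · exact le_trans (not_lt.mp hxy) (hs.1 z h)

-- the minimum Python's heappop returns is the head of the sorted permutation
theorem min_of_sorted_perm (l : List Int) (x : Int) (rest : List Int)
    (hperm : (x :: rest).Perm l) (hsort : (x :: rest).Pairwise (· ≤ ·)) :
    PySem.List.min? l (fun y => y) = some x := by
  obtain ⟨a, t, rfl⟩ : ∃ a t, l = a :: t := by
    cases l with
    | nil => exact absurd hperm.length_eq (by simp)
    | cons a t => exact ⟨a, t, rfl⟩
  rw [PySem.List.min?_id_cons]
  have hle := PySem.List.foldl_min_le t a
  have hmem : t.foldl min a = a ∨ t.foldl min a ∈ t := PySem.List.foldl_min_mem t a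
  have hminl : ∀ y ∈ a :: t, t.foldl min a ≤ y := by
    intro y hy
    rcases List.mem_cons.mp hy with h | h
    · exact h ▸ hle.1
    · exact hle.2 y h
  have hmx : t.foldl min a ∈ x :: rest := by
    apply hperm.mem_iff.mpr
    rcases hmem with h | h
    · rw [h]; exact List.mem_cons_self
    · exact List.mem_cons_of_mem a h
  have hxm : x ≤ t.foldl min a := by
    rw [List.pairwise_cons] at hsort
    rcases List.mem_cons.mp hmx with h | h
    · exact le_of_eq h.symm
    · exact hsort.1 _ h
  have hmxle : t.foldl min a ≤ x :=
    hminl x (hperm.mem_iff.mp (List.mem_cons_self : x ∈ x :: rest))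
  exact congrArg some (le_antisymm hmxle hxm)

-- the loops agree whenever the sorted queue q is a permutation of the heap l,
-- the fuel covers the length, and the one-element state is not below K
theorem go_eq (K : Int) : ∀ (fuel : Nat) (l q : List Int) (ans : Int),
    q.Perm l → q.Pairwise (· ≤ ·) → q.length ≤ fuel → (q.length = 1 → K ≤ q.headI) →
    solGo K fuel l ans = altGo K fuel q ans := by
  intro fuel
  induction fuel with
  | zero =>
    intro l q ans hperm _ hlen _
    simp [solGo, altGo]
  | succ fuel ih =>
    intro l q ans hperm hsort hlen h1
    cases q with
    | nil =>
      have hl : l = [] := List.eq_nil_of_length_eq_zero (hperm.length_eq ▸ rfl)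
      subst hl
      simp [solGo, altGo, PySem.List.min?]
    | cons x rest =>
      have hmin := min_of_sorted_perm l x rest hperm hsort
      by_cases hxK : x < K
      · cases rest with
        | nil =>
          exact absurd (h1 rfl) (not_le.mpr hxK)
        | cons y rest2 =>
          have hperm1 : (y :: rest2).Perm (l.erase x) := by
            have := hperm.erase x
            rwa [List.erase_cons_head] at this
          have hsort1 : (y :: rest2).Pairwise (· ≤ ·) := hsort.of_cons
          have hmin2 := min_of_sorted_perm (l.erase x) y rest2 hperm1 hsort1
          have hp2 : rest2.Perm ((l.erase x).erase y) := by
            have := hperm1.erase y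
            rwa [List.erase_cons_head] at this
          set v := x + y * 2 with hv
          set l2 := (l.erase x).erase y ++ [v] with hl2
          have hq3 : (insOrd v rest2).Perm l2 :=
            (perm_insOrd v rest2).trans ((hp2.cons v).trans (List.perm_append_singleton v _).symm)
          have hlen2 : l2.length = rest2.length + 1 := by
            simp [hl2, ← hp2.length_eq]
          have hlenq : rest2.length + 2 ≤ fuel + 1 := by
            simpa using hlen
          simp only [solGo, altGo, hmin, hmin2, if_pos hxK]
          by_cases hguard : l2.length < 2 ∧ l2.headI < K
          · -- A returns -1 here; B sees the singleton state next iteration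
            rw [if_pos hguard]
            have hr2 : rest2 = [] := by
              have : rest2.length = 0 := by omega
              exact List.eq_nil_of_length_eq_zero this
            subst hr2
            have hl2v : l2 = [v] := List.perm_singleton.mp (hq3.symm.trans (by simp [insOrd]))
            have hvK : v < K := by simpa [hl2v] using hguard.2
            obtain ⟨f, rfl⟩ : ∃ f, fuel = f + 1 := ⟨fuel - 1, by omega⟩
            rw [show insOrd v [] = [v] from rfl]
            simp only [altGo]
            rw [if_pos hvK]
          · rw [if_neg hguard]
            refine ih l2 (insOrd v rest2) (ans + 1) hq3 (sorted_insOrd v rest2 hsort1.of_cons) ?_ ?_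
            · rw [(hq3.length_eq), hlen2]; omega
            · intro hlq3
              rw [hq3.length_eq, hlen2] at hlq3
              have hr2 : rest2 = [] := List.eq_nil_of_length_eq_zero (by omega)
              subst hr2
              have hl2v : l2 = [v] := List.perm_singleton.mp (hq3.symm.trans (by simp [insOrd]))
              have : ¬ l2.headI < K := fun h => hguard ⟨by simp [hl2v], h⟩
              simpa [insOrd, hl2v] using not_lt.mp (fun h => this (by simpa [hl2v] using h))
      · simp [solGo, altGo, hmin, hxK]

-- ===== VERDICT (by name: the statement is the Claim_ definition above) =====
theorem solution_spec : Claim_equal_solution := by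
  intro scoville K _ hpre
  unfold Spec_solution solution solution_alt
  set q0 := PySem.List.sorted scoville (fun y => y) false with hq0
  have hperm : q0.Perm scoville := PySem.List.sorted_perm scoville (fun y => y) false
  apply go_eq K scoville.length scoville q0 0 hperm
    (PySem.List.sorted_pairwise scoville (fun y => y))
    (le_of_eq hperm.length_eq)
  intro hlq
  have hls : scoville.length = 1 := hperm.length_eq ▸ hlq
  obtain ⟨a, rfl⟩ := List.length_eq_one_iff.mp hls
  have hqa : q0 = [a] := List.perm_singleton.mp hperm
  rw [hqa]
  exact hpre.2 hls
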